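-- pv_equiv track=rewrite | github.com/MrRoboto11102003/Quantization_project | experiment2.py | _compute_stage_flops
-- ===== SOURCE A (Python) =====
-- def _compute_stage_flops(num_blocks):
--     # Initial conv
--     flops_base = 3 * 16 * 9 * 32 * 32
--
--     cfg = [(32, 16, 16, num_blocks[0]), (16, 32, 32, num_blocks[1]), (8, 64, 64, num_blocks[2])]
--     prev_c = 16
--
--     flops_layer3 = 0
--
--     for stage_idx, (h, c_out, _, n) in enumerate(cfg):
--         for i in range(n):
--             c_in = prev_c if i == 0 else c_out
--             block_f = c_in * c_out * 9 * h * h + c_out * c_out * 9 * h * h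
--             if c_in != c_out:
--                 block_f += c_in * c_out * 1 * h * h
--
--             if stage_idx < 2:
--                 flops_base += block_f
--             else:
--                 flops_layer3 += block_f
--
--         prev_c = c_out
--
--     return flops_base, flops_layer3
-- ===== SOURCE B (Python) =====
-- def _stage_total(prev_c, c_out, h, n):
--     # Closed-form cost of one stage: first block + (n-1) regular blocks.
--     if n <= 0:
--         return 0
--     hh = 9 * h * h
--     first = prev_c * c_out * hh + c_out * c_out * hh
--     if prev_c != c_out:
--         first += prev_c * c_out * h * h
--     regular = 2 * c_out * c_out * hh
--     return first + (n - 1) * regular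
--
--
-- def _compute_stage_flops(num_blocks):
--     base = 3 * 16 * 9 * 32 * 32
--     s0 = _stage_total(16, 16, 32, num_blocks[0])
--     s1 = _stage_total(16, 32, 16, num_blocks[1])
--     s2 = _stage_total(32, 64, 8, num_blocks[2])
--     return base + s0 + s1, s2
-- ===== Notes on version B (the rewrite author's own statement) =====
-- stated objective: faster
-- what changed: Replaced the per-block double loop with a closed-form per-stage total (first block + (n-1) * regular block), so no loop over blocks remains.
import Mathlib
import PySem

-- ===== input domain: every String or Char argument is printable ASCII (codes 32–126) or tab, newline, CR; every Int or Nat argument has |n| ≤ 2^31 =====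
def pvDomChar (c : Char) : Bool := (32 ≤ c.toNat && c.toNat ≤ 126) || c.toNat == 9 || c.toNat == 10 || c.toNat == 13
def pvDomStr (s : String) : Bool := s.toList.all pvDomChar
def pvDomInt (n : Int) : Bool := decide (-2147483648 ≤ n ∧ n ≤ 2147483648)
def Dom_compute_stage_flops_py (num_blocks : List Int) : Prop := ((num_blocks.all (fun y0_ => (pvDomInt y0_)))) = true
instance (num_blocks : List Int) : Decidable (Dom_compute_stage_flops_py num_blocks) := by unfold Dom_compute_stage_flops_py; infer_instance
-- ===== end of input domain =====

-- B replaces A's per-block inner loop by a closed-form per-stage total (first block + (n-1)·regular block).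
-- Equivalence is about the return value; tuple return is modelled as a 2-element list.

-- ===== PORT A =====
def compute_stage_flops_py (num_blocks : List Int) : List Int :=
  let flops_base : Int := 3 * 16 * 9 * 32 * 32
  let cfg : List (Int × Int × Int × Int) :=
    [(32, 16, 16, PySem.List.pyGetD num_blocks 0 0),
     (16, 32, 32, PySem.List.pyGetD num_blocks 1 0),
     (8, 64, 64, PySem.List.pyGetD num_blocks 2 0)]
  let st :=
    (PySem.List.enumerate cfg).foldl
      (fun (st : Int × Int × Int) p =>
        let stage_idx := p.1
        let h := p.2.1
        let c_out := p.2.2.1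
        let n := p.2.2.2.2
        let prev_c := st.1
        let acc :=
          (PySem.List.pyRange 0 n 1).foldl
            (fun (acc : Int × Int) i =>
              let c_in := if i == 0 then prev_c else c_out
              let block_f0 := c_in * c_out * 9 * h * h + c_out * c_out * 9 * h * h
              let block_f := if c_in ≠ c_out then block_f0 + c_in * c_out * 1 * h * h else block_f0
              if stage_idx < 2 then (acc.1 + block_f, acc.2) else (acc.1, acc.2 + block_f))
            (st.2.1, st.2.2)
        (c_out, acc.1, acc.2))
      (16, flops_base, 0)
  [st.2.1, st.2.2]

-- ===== PORT B =====
def pvStageTotal (prev_c c_out h n : Int) : Int :=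
  if n ≤ 0 then 0
  else
    let hh := 9 * h * h
    let first0 := prev_c * c_out * hh + c_out * c_out * hh
    let first := if prev_c ≠ c_out then first0 + prev_c * c_out * h * h else first0
    let regular := 2 * c_out * c_out * hh
    first + (n - 1) * regular

def compute_stage_flops_py_alt (num_blocks : List Int) : List Int :=
  let base : Int := 3 * 16 * 9 * 32 * 32
  let s0 := pvStageTotal 16 16 32 (PySem.List.pyGetD num_blocks 0 0)
  let s1 := pvStageTotal 16 32 16 (PySem.List.pyGetD num_blocks 1 0)
  let s2 := pvStageTotal 32 64 8 (PySem.List.pyGetD num_blocks 2 0)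
  [base + s0 + s1, s2]

-- ===== PRECONDITION & SPEC =====
-- Pre_ excludes exactly the inputs where Python A raises IndexError (fewer than 3 stages).
def Pre_compute_stage_flops_py (num_blocks : List Int) : Prop := 3 ≤ num_blocks.length
instance (num_blocks : List Int) : Decidable (Pre_compute_stage_flops_py num_blocks) := by unfold Pre_compute_stage_flops_py; infer_instance
def pvWitness_compute_stage_flops_py : List Int := ([3, 3, 3])

def Spec_compute_stage_flops_py (num_blocks : List Int) (out : List Int) : Prop := out = compute_stage_flops_py_alt num_blocks
instance (num_blocks : List Int) (out : List Int) : Decidable (Spec_compute_stage_flops_py num_blocks out) := by unfold Spec_compute_stage_flops_py; infer_instance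

-- ===== CLAIM (what is proved, stated in full; the proofs are below) =====
def Claim_equal_compute_stage_flops_py : Prop := ∀ (num_blocks : List Int), Dom_compute_stage_flops_py num_blocks → Pre_compute_stage_flops_py num_blocks → Spec_compute_stage_flops_py num_blocks (compute_stage_flops_py num_blocks)

-- ===== LEMMAS AND PROOFS =====

theorem foldl_pair_fst (l : List Int) (g : Int → Int) (a b : Int) :
    l.foldl (fun (p : Int × Int) i => (p.1 + g i, p.2)) (a, b)
      = (l.foldl (fun x i => x + g i) a, b) := by
  induction l generalizing a with
  | nil => rfl
  | cons x xs ih => simp [List.foldl, ih]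

theorem foldl_pair_snd (l : List Int) (g : Int → Int) (a b : Int) :
    l.foldl (fun (p : Int × Int) i => (p.1, p.2 + g i)) (a, b)
      = (a, l.foldl (fun x i => x + g i) b) := by
  induction l generalizing b with
  | nil => rfl
  | cons x xs ih => simp [List.foldl, ih]

-- A's per-stage loop sum equals B's closed form.
theorem stage_sum_eq (prev c h n fb : Int) :
    (PySem.List.pyRange 0 n 1).foldl
      (fun acc i =>
        acc + (let c_in := if i == 0 then prev else c
               let b0 := c_in * c * 9 * h * h + c * c * 9 * h * h
               if c_in ≠ c then b0 + c_in * c * 1 * h * h else b0)) fb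
      = fb + pvStageTotal prev c h n := by
  rw [PySem.List.foldl_add]
  congr 1
  by_cases hn : 0 < n
  · rw [PySem.List.pyRange_one_cons hn]
    simp only [List.map_cons, List.sum_cons]
    rw [List.map_congr_left (g := fun _ : Int => c * c * 9 * h * h + c * c * 9 * h * h)
        (by intro i hi
            have h1 : (1 : Int) ≤ i := ((PySem.List.mem_pyRange_one).1 hi).1
            have : (i == 0) = false := by simp; omega
            simp [this])]
    rw [PySem.List.sum_map_const_int, PySem.List.length_pyRange_one]
    have hcast : (((n - (0 + 1)).toNat : Int)) = n - 1 := by omega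
    rw [hcast]
    simp only [pvStageTotal, if_neg (show ¬ n ≤ 0 by omega)]
    norm_num
    split_ifs <;> ring
  · rw [PySem.List.pyRange_one_eq_nil (by omega)]
    simp [pvStageTotal, (by omega : n ≤ 0)]

-- one stage of A's outer loop, on the (flops_base, flops_layer3) pair
theorem stageA (sidx prev c h n : Int) (st : Int × Int) :
    (PySem.List.pyRange 0 n 1).foldl
      (fun (acc : Int × Int) i =>
        let c_in := if i == 0 then prev else c
        let b0 := c_in * c * 9 * h * h + c * c * 9 * h * h
        let b := if c_in ≠ c then b0 + c_in * c * 1 * h * h else b0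
        if sidx < 2 then (acc.1 + b, acc.2) else (acc.1, acc.2 + b)) st
      = if sidx < 2 then (st.1 + pvStageTotal prev c h n, st.2)
        else (st.1, st.2 + pvStageTotal prev c h n) := by
  obtain ⟨a, b⟩ := st
  by_cases hs : sidx < 2
  · simp only [hs, if_true]
    rw [foldl_pair_fst, stage_sum_eq]
  · simp only [hs, if_false]
    rw [foldl_pair_snd, stage_sum_eq]

-- ===== VERDICT (by name: the statement is the Claim_ definition above) =====
theorem compute_stage_flops_py_spec : Claim_equal_compute_stage_flops_py := by
  intro nb _ _
  unfold Spec_compute_stage_flops_py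
  show compute_stage_flops_py nb = compute_stage_flops_py_alt nb
  unfold compute_stage_flops_py compute_stage_flops_py_alt
  simp only [PySem.List.enumerate, List.foldl_cons, List.foldl_nil, stageA]
  norm_num
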